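-- pv_equiv track=rewrite | github.com/patelinadev/sync-practice | geometry_utils.py | draw_hollow_isosceles_trangle01
-- ===== SOURCE A (Python) =====
-- def draw_hollow_isosceles_trangle01(base_length: int):
--     result = ""
--     row = (base_length + 1) // 2
--     for i in range(row):
--         left_space =  row - i
--         if i == 0 or i == row - 1:
--             star = 2 * i + 1
--             result += " " * left_space
--             result += "*" * star
--             result += "\n"
--         else:
--             hollow = 2 * i - 1
--             result += " " * left_space
--             result += "*"
--             result += " " * hollow
--             result += "*"
--             result += "\n"
--     return result
-- ===== SOURCE B (Python) =====
-- def draw_hollow_isosceles_trangle01(base_length: int):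
--     row = (base_length + 1) // 2
--     lines = []
--     for i in range(row):
--         canvas = [" "] * (row + i + 1)
--         if i == row - 1:
--             for c in range(1, row + i + 1):
--                 canvas[c] = "*"
--         else:
--             canvas[row - i] = "*"
--             canvas[row + i] = "*"
--         lines.append("".join(canvas) + "\n")
--     return "".join(lines)
-- ===== Notes on version B (the rewrite author's own statement) =====
-- stated objective: alternative
-- what changed: B renders each line onto a space-filled character canvas of the exact width and places stars by their column indices (apex and edges coincide, bottom is a filled index run), instead of A's per-row string concatenation with a first/last branch and run-length arithmetic.
import Mathlib
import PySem

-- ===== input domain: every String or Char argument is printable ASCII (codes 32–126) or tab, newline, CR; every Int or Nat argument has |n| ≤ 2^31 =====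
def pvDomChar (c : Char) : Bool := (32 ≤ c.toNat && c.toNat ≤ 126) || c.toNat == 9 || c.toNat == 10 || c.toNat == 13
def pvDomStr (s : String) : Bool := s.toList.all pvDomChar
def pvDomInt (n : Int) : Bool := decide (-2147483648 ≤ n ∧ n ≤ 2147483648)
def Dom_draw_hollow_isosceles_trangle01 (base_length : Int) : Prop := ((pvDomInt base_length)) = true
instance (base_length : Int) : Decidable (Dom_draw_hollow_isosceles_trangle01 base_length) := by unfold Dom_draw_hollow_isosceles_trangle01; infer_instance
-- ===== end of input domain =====

-- B renders each line on a space-filled canvas of exact width, placing stars by column index,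
-- instead of A's per-row concatenation with a first/last branch (objective: alternative decomposition; return values proved equal).

-- ===== PORT A =====
-- strings are built as List Char and packed with String.mk at the end (PySem convention);
-- Python's " " * m (m possibly ≤ 0) is PySem.List.pyRepeat [' '] m — exact.
def draw_hollow_isosceles_trangle01 (base_length : Int) : String :=
  let row := PySem.Int.floordiv (base_length + 1) 2
  String.mk ((PySem.List.pyRange 0 row 1).foldl (fun (result : List Char) i =>
    let left_space := row - i
    if i == 0 || i == row - 1 then
      let star := 2 * i + 1
      result ++ PySem.List.pyRepeat [' '] left_space ++ PySem.List.pyRepeat ['*'] star ++ ['\n']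
    else
      let hollow := 2 * i - 1
      result ++ PySem.List.pyRepeat [' '] left_space ++ ['*'] ++ PySem.List.pyRepeat [' '] hollow ++ ['*'] ++ ['\n']) [])

-- ===== PORT B =====
-- canvas[c] = "*" is List.set at c.toNat; every index used is nonnegative and in range, so this is exact.
def draw_hollow_isosceles_trangle01_alt (base_length : Int) : String :=
  let row := PySem.Int.floordiv (base_length + 1) 2
  let lines := (PySem.List.pyRange 0 row 1).map (fun i =>
    let canvas := PySem.List.pyRepeat [' '] (row + i + 1)
    let canvas :=
      if i == row - 1 then
        (PySem.List.pyRange 1 (row + i + 1) 1).foldl (fun cv c => cv.set c.toNat '*') canvas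
      else
        ((canvas.set (row - i).toNat '*').set (row + i).toNat '*')
    canvas ++ ['\n'])
  String.mk lines.flatten

-- ===== PRECONDITION & SPEC =====
def Spec_draw_hollow_isosceles_trangle01 (base_length : Int) (out : String) : Prop := out = draw_hollow_isosceles_trangle01_alt base_length
instance (base_length : Int) (out : String) : Decidable (Spec_draw_hollow_isosceles_trangle01 base_length out) := by unfold Spec_draw_hollow_isosceles_trangle01; infer_instance

-- ===== CLAIM (what is proved, stated in full; the proofs are below) =====
def Claim_equal_draw_hollow_isosceles_trangle01 : Prop := ∀ (base_length : Int), Dom_draw_hollow_isosceles_trangle01 base_length → Spec_draw_hollow_isosceles_trangle01 base_length (draw_hollow_isosceles_trangle01 base_length)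

-- ===== LEMMAS AND PROOFS =====

-- the line A produces for loop index i
def lineA (row i : Int) : List Char :=
  if i == 0 || i == row - 1 then
    PySem.List.pyRepeat [' '] (row - i) ++ PySem.List.pyRepeat ['*'] (2 * i + 1) ++ ['\n']
  else
    PySem.List.pyRepeat [' '] (row - i) ++ ['*'] ++ PySem.List.pyRepeat [' '] (2 * i - 1) ++ ['*'] ++ ['\n']

-- the line B produces for loop index i
def lineB (row i : Int) : List Char :=
  (if i == row - 1 then
    (PySem.List.pyRange 1 (row + i + 1) 1).foldl (fun cv c => cv.set c.toNat '*')
      (PySem.List.pyRepeat [' '] (row + i + 1))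
  else
    (((PySem.List.pyRepeat [' '] (row + i + 1)).set (row - i).toNat '*').set (row + i).toNat '*')) ++ ['\n']

lemma foldl_lineA (row : Int) (l : List Int) (acc : List Char) :
    l.foldl (fun (result : List Char) i =>
      let left_space := row - i
      if i == 0 || i == row - 1 then
        let star := 2 * i + 1
        result ++ PySem.List.pyRepeat [' '] left_space ++ PySem.List.pyRepeat ['*'] star ++ ['\n']
      else
        let hollow := 2 * i - 1
        result ++ PySem.List.pyRepeat [' '] left_space ++ ['*'] ++ PySem.List.pyRepeat [' '] hollow ++ ['*'] ++ ['\n']) acc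
    = acc ++ (l.map (lineA row)).flatten := by
  induction l generalizing acc with
  | nil => simp
  | cons x xs ih =>
    rw [List.foldl_cons, ih]
    cases h : (x == 0 || x == row - 1) <;> simp [lineA, h, List.append_assoc]

lemma set_append_right (l₁ l₂ : List Char) (i : Nat) (a : Char) (h : l₁.length ≤ i) :
    (l₁ ++ l₂).set i a = l₁ ++ l₂.set (i - l₁.length) a := by
  induction l₁ generalizing i with
  | nil => simp
  | cons x xs ih =>
    cases i with
    | zero => simp at h
    | succ j =>
      simp only [List.cons_append, List.set_cons_succ, List.length_cons]
      rw [ih j (by simpa using h)]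
      have hl : j + 1 - (xs.length + 1) = j - xs.length := by omega
      rw [hl]

lemma set_replicate (m j : Nat) (c d : Char) (h : j < m) :
    (List.replicate m c).set j d = List.replicate j c ++ d :: List.replicate (m - j - 1) c := by
  induction j generalizing m with
  | zero =>
    cases m with
    | zero => omega
    | succ m' => simp [List.replicate_succ]
  | succ j' ih =>
    cases m with
    | zero => omega
    | succ m' =>
      simp only [List.replicate_succ, List.set_cons_succ, List.cons_append]
      rw [ih m' (by omega)]
      have : m' + 1 - (j' + 1) - 1 = m' - j' - 1 := by omega
      rw [this]

lemma fold_set_range (k a : Nat) (cv : List Char) (h : a + k ≤ cv.length) :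
    (List.range k).foldl (fun cv j => cv.set (a + j) '*') cv
    = cv.take a ++ List.replicate k '*' ++ cv.drop (a + k) := by
  induction k with
  | zero => simp
  | succ k' ih =>
    rw [List.range_succ, List.foldl_append]
    rw [ih (by omega)]
    simp only [List.foldl_cons, List.foldl_nil]
    have hta : (List.take a cv).length = a := by simp only [List.length_take]; omega
    rw [List.append_assoc, set_append_right _ _ _ _ (by rw [hta]; omega)]
    rw [hta]
    have h1 : a + k' - a = k' := by omega
    rw [h1]
    rw [set_append_right _ _ _ _ (by simp)]
    have h2 : k' - (List.replicate k' '*' : List Char).length = 0 := by simp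
    rw [h2]
    have hlt : a + k' < cv.length := by omega
    rw [List.drop_eq_getElem_cons hlt]
    simp only [List.set_cons_zero]
    have h3 : a + (k' + 1) = a + k' + 1 := by omega
    rw [h3, List.replicate_succ']
    simp [List.append_assoc]

lemma line_eq (n k : Nat) (hk : k < n) :
    lineA (n : Int) (k : Int) = lineB (n : Int) (k : Int) := by
  rw [lineA, lineB]
  by_cases hb : k = n - 1
  · -- bottom row (this is also the apex when n = 1)
    have hB : ((k : Int) == (n : Int) - 1) = true := by
      rw [beq_iff_eq]; omega
    have hA : (((k : Int) == 0) || ((k : Int) == (n : Int) - 1)) = true := by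
      rw [hB]; simp
    rw [if_pos hA, if_pos hB]
    rw [PySem.List.pyRepeat_singleton, PySem.List.pyRepeat_singleton, PySem.List.pyRepeat_singleton]
    rw [PySem.List.pyRange_one, List.foldl_map]
    have c1 : ((n : Int) - (k : Int)).toNat = 1 := by omega
    have c2 : (2 * (k : Int) + 1).toNat = n + k := by omega
    have c3 : ((n : Int) + (k : Int) + 1).toNat = n + k + 1 := by omega
    have c4 : ((n : Int) + (k : Int) + 1 - 1).toNat = n + k := by omega
    have hfn : (fun (x : List Char) (y : ℕ) => x.set (1 + (y : Int)).toNat '*')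
        = fun (cv : List Char) (j : ℕ) => cv.set (1 + j) '*' := by
      funext cv j
      have e : ((1 : Int) + (j : Int)).toNat = 1 + j := by omega
      rw [e]
    rw [c1, c2, c3, c4, hfn]
    rw [fold_set_range (n + k) 1 _ (by simp [List.length_replicate]; omega)]
    simp [List.take_replicate, List.drop_replicate]
  · by_cases h0 : k = 0
    · -- apex row, n ≥ 2
      have hB : ((k : Int) == (n : Int) - 1) = false := by
        rw [beq_eq_false_iff_ne]; omega
      have hA : (((k : Int) == 0) || ((k : Int) == (n : Int) - 1)) = true := by
        subst h0; simp
      rw [if_pos hA, if_neg (by simp [hB])]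
      rw [PySem.List.pyRepeat_singleton, PySem.List.pyRepeat_singleton, PySem.List.pyRepeat_singleton]
      have c1 : ((n : Int) - (k : Int)).toNat = n := by omega
      have c2 : (2 * (k : Int) + 1).toNat = 1 := by omega
      have c3 : ((n : Int) + (k : Int) + 1).toNat = n + 1 := by omega
      have c4 : ((n : Int) + (k : Int)).toNat = n := by omega
      rw [c1, c2, c3, c4, List.set_set]
      rw [set_replicate (n + 1) n ' ' '*' (by omega)]
      simp
    · -- interior row
      have hB : ((k : Int) == (n : Int) - 1) = false := by
        rw [beq_eq_false_iff_ne]; omega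
      have h0' : ((k : Int) == 0) = false := by
        rw [beq_eq_false_iff_ne]; omega
      have hA : (((k : Int) == 0) || ((k : Int) == (n : Int) - 1)) = false := by
        rw [hB, h0']; simp
      rw [if_neg (by simp [hA]), if_neg (by simp [hB])]
      rw [PySem.List.pyRepeat_singleton, PySem.List.pyRepeat_singleton, PySem.List.pyRepeat_singleton]
      have c1 : ((n : Int) - (k : Int)).toNat = n - k := by omega
      have c5 : (2 * (k : Int) - 1).toNat = 2 * k - 1 := by omega
      have c3 : ((n : Int) + (k : Int) + 1).toNat = n + k + 1 := by omega
      have c4 : ((n : Int) + (k : Int)).toNat = n + k := by omega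
      rw [c1, c5, c3, c4]
      rw [set_replicate (n + k + 1) (n - k) ' ' '*' (by omega)]
      have e2k : n + k + 1 - (n - k) - 1 = 2 * k := by omega
      rw [e2k]
      rw [set_append_right _ _ _ _ (by simp [List.length_replicate]; omega)]
      rw [List.length_replicate]
      have e6 : n + k - (n - k) = 2 * k - 1 + 1 := by omega
      rw [e6, List.set_cons_succ]
      rw [show 2 * k = 2 * k - 1 + 1 by omega]
      rw [show 2 * k - 1 + 1 - 1 = 2 * k - 1 from by omega]
      rw [set_replicate (2 * k - 1 + 1) (2 * k - 1) ' ' '*' (by omega)]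
      simp

theorem main_eq (b : Int) :
    draw_hollow_isosceles_trangle01 b = draw_hollow_isosceles_trangle01_alt b := by
  unfold draw_hollow_isosceles_trangle01 draw_hollow_isosceles_trangle01_alt
  simp only []
  rw [foldl_lineA]
  simp only [List.nil_append]
  congr 1
  apply congrArg
  apply List.map_congr_left
  intro i hi
  rw [PySem.List.mem_pyRange_one] at hi
  obtain ⟨h0, h1⟩ := hi
  have hrow : 0 ≤ PySem.Int.floordiv (b + 1) 2 := le_trans h0 (le_of_lt h1)
  have := line_eq (PySem.Int.floordiv (b + 1) 2).toNat i.toNat (by omega)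
  rw [Int.toNat_of_nonneg hrow, Int.toNat_of_nonneg h0] at this
  rw [this]
  simp [lineB]

-- ===== VERDICT (by name: the statement is the Claim_ definition above) =====
theorem draw_hollow_isosceles_trangle01_spec : Claim_equal_draw_hollow_isosceles_trangle01 := by
  intro b _
  unfold Spec_draw_hollow_isosceles_trangle01
  exact main_eq b
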